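-- pv_equiv track=rewrite | github.com/all1m-algorithm-study/2021-1-Algorithm-Study | week3/Group6/boj1992_parkjinsung.py | check_pixel
-- ===== SOURCE A (Python) =====
-- def check_pixel(pixel, n):
--     check = pixel[0][0]
--     temp = -1
--     for i in range(n):
--         for j in range(n):
--             temp = pixel[i][j]
--             if temp != check:
--                 return -1
--     return check
-- ===== SOURCE B (Python) =====
-- def check_pixel(pixel, n):
--     check = pixel[0][0]
--     vals = {pixel[i][j] for i in range(n) for j in range(n)}
--     return check if len(vals) <= 1 else -1
-- ===== Notes on version B (the rewrite author's own statement) =====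
-- stated objective: simpler
-- what changed: Replaces the element-by-element comparison with early return by collecting all values of the n-by-n window into a set and testing that it has at most one element; Pre_ excludes ragged grids on which A's early exit returns -1 before reaching a too-short row, because B's full-window comprehension raises IndexError there.
-- outside the precondition, e.g. on check_pixel([[1, 2], [3]], 2): A returns -1, B raises IndexError
import Mathlib
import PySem

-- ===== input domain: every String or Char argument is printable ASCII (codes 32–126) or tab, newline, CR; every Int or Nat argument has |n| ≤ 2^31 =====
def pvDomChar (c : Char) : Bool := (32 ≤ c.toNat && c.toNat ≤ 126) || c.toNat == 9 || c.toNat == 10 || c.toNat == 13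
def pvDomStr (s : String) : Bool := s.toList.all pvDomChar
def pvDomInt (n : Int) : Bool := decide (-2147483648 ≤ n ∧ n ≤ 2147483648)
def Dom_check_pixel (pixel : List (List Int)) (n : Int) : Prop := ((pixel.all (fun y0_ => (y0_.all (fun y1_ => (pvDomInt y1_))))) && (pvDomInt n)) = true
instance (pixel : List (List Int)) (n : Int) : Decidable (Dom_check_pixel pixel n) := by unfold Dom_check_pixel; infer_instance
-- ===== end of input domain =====

-- B replaces A's early-exit element-by-element comparison by collecting the distinct values
-- of the n×n window into a set and testing that it has at most one element (simpler; not
-- faster — A can exit early).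

-- ===== PORT A =====
-- pixel[i][j], total here via defaults; Pre_ admits only inputs where every access Python
-- performs is in range (shared by both ports)
def pvVal (pixel : List (List Int)) (i j : Int) : Int :=
  (PySem.List.pyGet? ((PySem.List.pyGet? pixel i).getD []) j).getD 0

-- the inner 'for j in range(n)' loop, counting j upward (range(n) taken lazily, as Python
-- does): some (-1) = early return, none = fell through
def pvInnerA (pixel : List (List Int)) (check i n j : Int) : Option Int :=
  if _h : j < n then
    let temp := pvVal pixel i j
    if temp ≠ check then some (-1) else pvInnerA pixel check i n (j + 1)
  else none
termination_by (n - j).toNat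
decreasing_by omega

-- the outer 'for i in range(n)' loop, counting i upward
def pvOuterA (pixel : List (List Int)) (check n i : Int) : Int :=
  if _h : i < n then
    match pvInnerA pixel check i n 0 with
    | some r => r
    | none => pvOuterA pixel check n (i + 1)
  else check
termination_by (n - i).toNat
decreasing_by omega

def check_pixel (pixel : List (List Int)) (n : Int) : Int :=
  let check := pvVal pixel 0 0
  pvOuterA pixel check n 0

-- ===== PORT B =====
-- the set comprehension {pixel[i][j] for i in range(n) for j in range(n)}
def check_pixel_alt (pixel : List (List Int)) (n : Int) : Int :=
  let check := pvVal pixel 0 0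
  let vals : PySem.Set Int :=
    (PySem.List.pyRange 0 n 1).foldl
      (fun s i => (PySem.List.pyRange 0 n 1).foldl
        (fun s j => PySem.Set.add s (pvVal pixel i j)) s)
      PySem.Set.empty
  if vals.length ≤ 1 then check else -1

-- ===== PRECONDITION & SPEC =====
-- Pre_ requires pixel[0][0] to exist (else both raise IndexError) and, for positive n, the
-- whole n×n window to be in range; this also excludes ragged grids on which A's early exit
-- returns -1 before reaching a too-short row, because B's full-window comprehension raises
-- IndexError there.
def Pre_check_pixel (pixel : List (List Int)) (n : Int) : Prop :=
  pixel ≠ [] ∧ pixel.headI ≠ [] ∧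
  (0 < n → n ≤ (pixel.length : Int) ∧ ∀ row ∈ pixel.take n.toNat, n ≤ (row.length : Int))
instance (pixel : List (List Int)) (n : Int) : Decidable (Pre_check_pixel pixel n) := by
  unfold Pre_check_pixel; infer_instance

def pvWitness_check_pixel : List (List Int) × Int := ([[3]], 1)

def Spec_check_pixel (pixel : List (List Int)) (n : Int) (out : Int) : Prop := out = check_pixel_alt pixel n
instance (pixel : List (List Int)) (n : Int) (out : Int) : Decidable (Spec_check_pixel pixel n out) := by unfold Spec_check_pixel; infer_instance

-- ===== CLAIM (what is proved, stated in full; the proofs are below) =====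
def Claim_equal_check_pixel : Prop := ∀ (pixel : List (List Int)) (n : Int), Dom_check_pixel pixel n → Pre_check_pixel pixel n → Spec_check_pixel pixel n (check_pixel pixel n)

-- ===== LEMMAS AND PROOFS =====

theorem pvInnerA_eq (pixel : List (List Int)) (check i n : Int) :
    ∀ (m : Nat) (j : Int), (n - j).toNat = m →
      pvInnerA pixel check i n j =
        if ∀ k ∈ PySem.List.pyRange j n 1, pvVal pixel i k = check
        then none else some (-1) := by
  intro m
  induction m with
  | zero =>
    intro j hm
    rw [pvInnerA, dif_neg (by omega), if_pos]
    intro k hk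
    rw [PySem.List.mem_pyRange_one] at hk
    omega
  | succ m ih =>
    intro j hm
    have hlt : j < n := by omega
    rw [pvInnerA, dif_pos hlt, PySem.List.pyRange_one_cons hlt]
    by_cases h : pvVal pixel i j = check
    · simp only [h, ne_eq, not_true_eq_false, if_false]
      rw [ih (j + 1) (by omega)]
      by_cases h2 : ∀ k ∈ PySem.List.pyRange (j + 1) n 1, pvVal pixel i k = check
      · rw [if_pos h2, if_pos]
        intro k hk
        rcases List.mem_cons.mp hk with rfl | hk
        · exact h
        · exact h2 k hk
      · rw [if_neg h2, if_neg]
        intro hall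
        exact h2 fun k hk => hall k (List.mem_cons_of_mem j hk)
    · simp only [h, ne_eq, not_false_eq_true, if_true]
      rw [if_neg]
      intro hall
      exact h (hall j List.mem_cons_self)

theorem pvOuterA_eq (pixel : List (List Int)) (check n : Int) :
    ∀ (m : Nat) (i : Int), (n - i).toNat = m →
      pvOuterA pixel check n i =
        if ∀ i' ∈ PySem.List.pyRange i n 1, ∀ j ∈ PySem.List.pyRange 0 n 1,
            pvVal pixel i' j = check
        then check else -1 := by
  intro m
  induction m with
  | zero =>
    intro i hm
    rw [pvOuterA, dif_neg (by omega), if_pos]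
    intro i' hi'
    rw [PySem.List.mem_pyRange_one] at hi'
    omega
  | succ m ih =>
    intro i hm
    have hlt : i < n := by omega
    rw [pvOuterA, dif_pos hlt, pvInnerA_eq pixel check i n (n - 0).toNat 0 rfl,
      PySem.List.pyRange_one_cons hlt]
    by_cases h : ∀ k ∈ PySem.List.pyRange 0 n 1, pvVal pixel i k = check
    · rw [if_pos h]
      rw [ih (i + 1) (by omega)]
      by_cases h2 : ∀ i' ∈ PySem.List.pyRange (i + 1) n 1,
          ∀ j ∈ PySem.List.pyRange 0 n 1, pvVal pixel i' j = check
      · rw [if_pos h2, if_pos]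
        intro i' hi'
        rcases List.mem_cons.mp hi' with rfl | hi'
        · exact h
        · exact h2 i' hi'
      · rw [if_neg h2, if_neg]
        intro hall
        exact h2 fun i' hi' => hall i' (List.mem_cons_of_mem i hi')
    · rw [if_neg h, if_neg]
      intro hall
      exact h (hall i List.mem_cons_self)

theorem pv_mem_foldl_add {β : Type} [BEq β] [LawfulBEq β] (l : List β)
    (s : PySem.Set β) (x : β) :
    (x ∈ l.foldl (fun s v => PySem.Set.add s v) s) ↔ x ∈ s ∨ x ∈ l := by
  induction l generalizing s with
  | nil => simp
  | cons a rest ih =>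
    simp only [List.foldl_cons, ih, PySem.Set.mem_add, List.mem_cons]
    tauto

theorem pv_nodup_foldl_add {β : Type} [BEq β] [LawfulBEq β] (l : List β)
    (s : PySem.Set β) (h : s.Nodup) :
    (l.foldl (fun s v => PySem.Set.add s v) s).Nodup := by
  induction l generalizing s with
  | nil => exact h
  | cons a rest ih =>
    rw [List.foldl_cons]
    exact ih _ (PySem.Set.nodup_add _ _ h)

-- the nested comprehension fold, characterised: membership and Nodup
theorem pv_mem_fold2 (f : Int → Int → Int) (l1 l2 : List Int)
    (s0 : PySem.Set Int) (x : Int) :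
    (x ∈ l1.foldl (fun s i => l2.foldl (fun s j => PySem.Set.add s (f i j)) s) s0) ↔
      x ∈ s0 ∨ ∃ i ∈ l1, ∃ j ∈ l2, x = f i j := by
  induction l1 generalizing s0 with
  | nil => simp
  | cons a rest ih =>
    have hmap : ∀ s : PySem.Set Int,
        l2.foldl (fun s j => PySem.Set.add s (f a j)) s =
          (l2.map (f a)).foldl (fun s v => PySem.Set.add s v) s := by
      intro s; rw [List.foldl_map]
    simp only [List.foldl_cons, ih, hmap, pv_mem_foldl_add, List.mem_cons, List.mem_map]
    constructor
    · rintro ((h | ⟨j, hj, hx⟩) | ⟨i, hi, j, hj, hx⟩)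
      · exact Or.inl h
      · exact Or.inr ⟨a, Or.inl rfl, j, hj, hx.symm⟩
      · exact Or.inr ⟨i, Or.inr hi, j, hj, hx⟩
    · rintro (h | ⟨i, (rfl | hi), j, hj, hx⟩)
      · exact Or.inl (Or.inl h)
      · exact Or.inl (Or.inr ⟨j, hj, hx.symm⟩)
      · exact Or.inr ⟨i, hi, j, hj, hx⟩

theorem pv_nodup_fold2 (f : Int → Int → Int) (l1 l2 : List Int)
    (s0 : PySem.Set Int) (h : s0.Nodup) :
    (l1.foldl (fun s i => l2.foldl (fun s j => PySem.Set.add s (f i j)) s) s0).Nodup := by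
  induction l1 generalizing s0 with
  | nil => exact h
  | cons a rest ih =>
    rw [List.foldl_cons]
    refine ih _ ?_
    have : l2.foldl (fun s j => PySem.Set.add s (f a j)) s0 =
        (l2.map (f a)).foldl (fun s v => PySem.Set.add s v) s0 := (List.foldl_map ..).symm
    rw [this]
    exact pv_nodup_foldl_add _ _ h

theorem pv_len_le_one {β : Type} (l : List β) (h : l.Nodup) :
    l.length ≤ 1 ↔ ∀ x ∈ l, ∀ y ∈ l, x = y := by
  match l with
  | [] => simp
  | [a] => simp
  | a :: b :: t =>
    constructor
    · intro hl
      exact absurd hl (by simp only [List.length_cons]; omega)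
    · intro hall
      have hab : a = b := hall a (by simp) b (by simp)
      rw [List.nodup_cons] at h
      exact absurd (by simp [hab]) h.1

theorem check_pixel_eq (pixel : List (List Int)) (n : Int)
    (hpre : Pre_check_pixel pixel n) :
    check_pixel pixel n = check_pixel_alt pixel n := by
  obtain ⟨hne, hrow0, hwin⟩ := hpre
  unfold check_pixel check_pixel_alt
  rw [pvOuterA_eq pixel (pvVal pixel 0 0) n (n - 0).toNat 0 rfl]
  have hnd := pv_nodup_fold2 (pvVal pixel) (PySem.List.pyRange 0 n 1)
      (PySem.List.pyRange 0 n 1) (PySem.Set.empty : PySem.Set Int)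
      (by simp [PySem.Set.empty])
  refine if_congr ?_ rfl rfl
  constructor
  · -- all window values equal check → the set is pairwise equal
    intro hall
    rw [pv_len_le_one _ hnd]
    intro x hx y hy
    rw [pv_mem_fold2] at hx hy
    rcases hx with hx | ⟨i, hi, j, hj, rfl⟩
    · simp [PySem.Set.empty] at hx
    rcases hy with hy | ⟨i', hi', j', hj', rfl⟩
    · simp [PySem.Set.empty] at hy
    rw [hall i hi j hj, hall i' hi' j' hj']
  · -- the set is pairwise equal → all window values equal check
    intro hlen i hi j hj
    have h0 : (0 : Int) ∈ PySem.List.pyRange 0 n 1 := by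
      rw [PySem.List.mem_pyRange_one] at hi ⊢
      omega
    rw [pv_len_le_one _ hnd] at hlen
    have hx : pvVal pixel i j ∈ (PySem.List.pyRange 0 n 1).foldl
        (fun s i => (PySem.List.pyRange 0 n 1).foldl
          (fun s j => PySem.Set.add s (pvVal pixel i j)) s)
        (PySem.Set.empty : PySem.Set Int) := by
      rw [pv_mem_fold2]; exact Or.inr ⟨i, hi, j, hj, rfl⟩
    have hc : pvVal pixel 0 0 ∈ (PySem.List.pyRange 0 n 1).foldl
        (fun s i => (PySem.List.pyRange 0 n 1).foldl
          (fun s j => PySem.Set.add s (pvVal pixel i j)) s)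
        (PySem.Set.empty : PySem.Set Int) := by
      rw [pv_mem_fold2]; exact Or.inr ⟨0, h0, 0, h0, rfl⟩
    exact hlen _ hx _ hc

-- ===== VERDICT (by name: the statement is the Claim_ definition above) =====
theorem check_pixel_spec : Claim_equal_check_pixel := by
  intro pixel n _ hpre
  unfold Spec_check_pixel
  exact check_pixel_eq pixel n hpre
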